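-- pv_equiv track=rewrite | github.com/graceeunhyun/codetree-TILs | 231201/흥미로운 숫자 2/interesting-numbers-2.py | checkNum
-- ===== SOURCE A (Python) =====
-- def are_elements_equal(arr, index):
--     other = [arr[i] for i in range(len(arr)) if i != index]
--     return all(element == other[0] for element in other)
--
-- def checkNum(num):
--     str_num = str(num)
--     change_count = 0  # Track the number of changes in digits
--
--     for i in range(len(str_num) - 1):
--         if str_num[i] != str_num[i + 1]:
--             if are_elements_equal(str_num, i) or are_elements_equal(str_num, i + 1):
--                 return True
--             else:
--                 return False
--
--     return change_count == 1  # Only one change is allowed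
-- ===== SOURCE B (Python) =====
-- def checkNum(num):
--     s = str(num)
--     distinct = set(s)
--     return len(distinct) == 2 and min(s.count(c) for c in distinct) == 1
-- ===== Notes on version B (the rewrite author's own statement) =====
-- stated objective: simpler
-- what changed: Replaced A's scan for the first adjacent digit mismatch plus per-removal rebuild-and-check of the remaining characters with a single global frequency test: exactly two distinct characters and one of them occurs exactly once.
import Mathlib
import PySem

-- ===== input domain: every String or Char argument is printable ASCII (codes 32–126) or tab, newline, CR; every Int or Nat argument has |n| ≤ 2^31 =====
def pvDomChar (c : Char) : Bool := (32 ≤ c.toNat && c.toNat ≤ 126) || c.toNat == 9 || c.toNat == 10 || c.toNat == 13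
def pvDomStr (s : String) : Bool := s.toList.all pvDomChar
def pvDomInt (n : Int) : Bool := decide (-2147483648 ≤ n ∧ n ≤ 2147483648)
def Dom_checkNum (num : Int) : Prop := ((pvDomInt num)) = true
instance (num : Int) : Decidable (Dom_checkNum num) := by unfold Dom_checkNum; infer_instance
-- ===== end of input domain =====

-- B replaces A's first-mismatch scan plus per-removal uniformity checks with a single global
-- frequency test (exactly two distinct characters, one of them occurring exactly once): simpler.

-- ===== PORT A =====
-- 'other = [arr[i] for i in range(len(arr)) if i != index]'; arr[i] is always in range here,
-- so the total form pyGetD is exact.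
def areElementsEqual (arr : List Char) (index : Int) : Bool :=
  let other : List Char :=
    ((PySem.List.pyRange 0 (arr.length : Int) 1).filter (fun i => i ≠ index)).map
      (fun i => PySem.List.pyGetD arr i ' ')
  -- 'all(element == other[0] for element in other)': the generator never evaluates other[0]
  -- when other is empty, so all() is True there (no IndexError).
  match other with
  | [] => true
  | h :: _ => other.all (fun element => element == h)

-- the for-loop over range(len(str_num) - 1) with its early returns
def checkNumLoop (strNum : List Char) : List Int → Bool
  | [] => decide ((0 : Int) = 1)  -- 'return change_count == 1'; change_count is never modified
  | i :: rest =>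
    if PySem.List.pyGet? strNum i ≠ PySem.List.pyGet? strNum (i + 1) then
      areElementsEqual strNum i || areElementsEqual strNum (i + 1)
    else
      checkNumLoop strNum rest

def checkNum (num : Int) : Bool :=
  let strNum := (PySem.Int.toStr num).toList
  checkNumLoop strNum (PySem.List.pyRange 0 ((strNum.length : Int) - 1) 1)

-- ===== PORT B =====
-- len(set(s)) and min over the counts of the set's elements are independent of Python's
-- set iteration order, so consuming the PySem.Set here is exact.
def checkNum_alt (num : Int) : Bool :=
  let s := (PySem.Int.toStr num).toList
  let distinct : PySem.Set Char := PySem.Set.ofList s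
  decide (distinct.length = 2) &&
    decide (PySem.List.min? (distinct.map (fun c => (s.count c : Int))) (fun x => x) = some 1)

-- ===== PRECONDITION & SPEC =====
def Spec_checkNum (num : Int) (out : Bool) : Prop := out = checkNum_alt num
instance (num : Int) (out : Bool) : Decidable (Spec_checkNum num out) := by unfold Spec_checkNum; infer_instance

-- ===== CLAIM (what is proved, stated in full; the proofs are below) =====
def Claim_equal_checkNum : Prop := ∀ (num : Int), Dom_checkNum num → Spec_checkNum num (checkNum num)

-- ===== LEMMAS AND PROOFS =====

-- all-equal-to-head test, as A's are_elements_equal computes it on the erased list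
def allB (l : List Char) : Bool :=
  match l with
  | [] => true
  | h :: _ => l.all (fun e => e == h)

-- A's scan, after the uniform prefix replicate (m+1) a has been consumed
def scanB (a : Char) (m : Nat) : List Char → Bool
  | [] => false
  | b :: t => if a = b then scanB a (m + 1) t
      else ((decide (m = 0) && t.all (· == b)) || t.all (· == a))

theorem getD_range_map (l : List Char) :
    (List.range l.length).map (fun k => l.getD k ' ') = l := by
  induction l with
  | nil => rfl
  | cons c tl ih =>
    simp only [List.length_cons, List.range_succ_eq_map, List.map_cons, List.map_map]
    simpa using ih

theorem fm (arr : List Char) (j : Nat) :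
    ((List.range arr.length).filter (fun (k : Nat) => !decide ((k : Int) = (j : Int)))).map
      (fun (k : Nat) => arr.getD k ' ') = arr.eraseIdx j := by
  induction arr generalizing j with
  | nil => rfl
  | cons c tl ih =>
    simp only [List.length_cons, List.range_succ_eq_map, List.filter_cons, List.filter_map]
    cases j with
    | zero =>
      simp only [Nat.cast_zero]
      have h1 : (List.range tl.length).filter
          ((fun (k : Nat) => !decide ((k : Int) = (0 : Int))) ∘ Nat.succ) = List.range tl.length := by
        apply List.filter_eq_self.mpr
        intro k _
        simp
      rw [h1]
      simpa [List.map_map] using getD_range_map tl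
    | succ j' =>
      have h0 : (!decide (((0:Nat) : Int) = ((j'+1 : Nat) : Int))) = true := by
        simp only [Bool.not_eq_eq_eq_not, Bool.not_true, decide_eq_false_iff_not]
        push_cast
        omega
      rw [h0]
      simp only [if_true, List.map_cons, List.map_map, List.getD_cons_zero, List.eraseIdx_cons_succ]
      congr 1
      have h2 : (List.range tl.length).filter
          ((fun (k : Nat) => !decide ((k : Int) = ((j'+1 : Nat) : Int))) ∘ Nat.succ)
          = (List.range tl.length).filter (fun (k : Nat) => !decide ((k : Int) = (j' : Int))) := by
        apply List.filter_congr
        intro k _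
        simp only [Function.comp]
        congr 1
        push_cast
        simp
      rw [h2]
      have := ih j'
      rw [← this]
      apply List.map_congr_left
      intro k hk
      simp

theorem fm2 (arr : List Char) (j : Nat) :
    List.map ((fun i => PySem.List.pyGetD arr i ' ') ∘ fun k : Nat => (k : Int))
      (List.filter ((fun i : Int => decide (i ≠ (j : Int))) ∘ fun k : Nat => (k : Int))
        (List.range arr.length)) = arr.eraseIdx j := by
  have hp : ((fun i : Int => decide (i ≠ (j : Int))) ∘ fun k : Nat => (k : Int))
      = (fun k : Nat => !decide ((k : Int) = (j : Int))) := by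
    funext k; simp [Function.comp]
  rw [hp]
  rw [← fm arr j]
  apply List.map_congr_left
  intro k _
  simp [Function.comp, PySem.List.pyGetD_natCast]

theorem areEq_eq (arr : List Char) (j : Nat) :
    areElementsEqual arr (j : Int) = allB (arr.eraseIdx j) := by
  unfold areElementsEqual allB
  rw [show ((arr.length : Int)) = ((arr.length : Nat) : Int) from rfl,
    PySem.List.pyRange_zero_natCast, List.filter_map, List.map_map, fm2 arr j]

theorem allB_cons (b : Char) (t : List Char) : allB (b :: t) = t.all (· == b) := by
  simp [allB]

theorem allB_rep_ne (m : Nat) (a b : Char) (t : List Char) (h : a ≠ b) :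
    allB (List.replicate (m + 1) a ++ b :: t) = false := by
  rw [List.replicate_succ, List.cons_append]
  simp only [allB, List.all_cons, List.all_append]
  simp [Ne.symm h]

theorem allB_rep_app (m : Nat) (a : Char) (t : List Char) :
    allB (List.replicate (m + 1) a ++ t) = t.all (· == a) := by
  rw [List.replicate_succ, List.cons_append]
  simp [allB, List.all_replicate]

theorem erase_at_m (m : Nat) (a : Char) (l : List Char) :
    (List.replicate (m + 1) a ++ l).eraseIdx m = List.replicate m a ++ l := by
  rw [List.replicate_succ' , List.append_assoc,
    List.eraseIdx_append_of_length_le (by simp) , List.length_replicate]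
  simp

theorem erase_at_succ (m : Nat) (a b : Char) (t : List Char) :
    (List.replicate (m + 1) a ++ b :: t).eraseIdx (m + 1) = List.replicate (m + 1) a ++ t := by
  rw [List.eraseIdx_append_of_length_le (by simp), List.length_replicate]
  simp

theorem rep_succ_cons (m : Nat) (a : Char) (l : List Char) :
    List.replicate (m + 1) a ++ l = List.replicate m a ++ a :: l := by
  rw [List.replicate_succ', List.append_assoc]
  rfl

theorem pyGet_rep_m (m : Nat) (a : Char) (l : List Char) :
    PySem.List.pyGet? (List.replicate (m + 1) a ++ l) ((m : Nat) : Int) = some a := by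
  rw [rep_succ_cons]
  simp

theorem pyGet_rep_succ (m : Nat) (a b : Char) (t : List Char) :
    PySem.List.pyGet? (List.replicate (m + 1) a ++ b :: t) ((m : Int) + 1) = some b := by
  have h : ((m : Int) + 1) = (((m + 1 : Nat)) : Int) := by push_cast; ring
  rw [h]
  simpa using PySem.List.pyGet?_append_length (List.replicate (m + 1) a) t b

theorem add_of_mem (s : PySem.Set Char) (x : Char) (h : x ∈ s) : PySem.Set.add s x = s := by
  simp [PySem.Set.add, PySem.Set.contains, h]

theorem add_of_not_mem (s : PySem.Set Char) (x : Char) (h : ¬ x ∈ s) :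
    PySem.Set.add s x = s ++ [x] := by
  simp [PySem.Set.add, PySem.Set.contains, h]

theorem foldl_add_subset (l : List Char) : ∀ (acc : PySem.Set Char),
    (∀ x ∈ l, x ∈ acc) → l.foldl PySem.Set.add acc = acc := by
  induction l with
  | nil => intro acc _; rfl
  | cons c tl ih =>
    intro acc h
    rw [List.foldl_cons, add_of_mem acc c (h c List.mem_cons_self)]
    exact ih acc (fun x hx => h x (List.mem_cons_of_mem c hx))

theorem foldl_add_rep (k : Nat) (a : Char) :
    List.foldl PySem.Set.add [] (List.replicate (k + 1) a) = [a] := by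
  rw [List.replicate_succ, List.foldl_cons, add_of_not_mem [] a (by simp), List.nil_append]
  exact foldl_add_subset _ _ (fun x hx => by simp [List.eq_of_mem_replicate hx])

theorem ofList_rep (m : Nat) (a : Char) (rest : List Char) :
    PySem.Set.ofList (List.replicate (m + 1) a ++ rest) = List.foldl PySem.Set.add [a] rest := by
  rw [PySem.Set.ofList_eq_foldl, List.foldl_append, foldl_add_rep]

theorem ofList_ab (m : Nat) (a b : Char) (t : List Char) (hab : a ≠ b)
    (ht : ∀ x ∈ t, x = a ∨ x = b) :
    PySem.Set.ofList (List.replicate (m + 1) a ++ b :: t) = [a, b] := by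
  rw [ofList_rep, List.foldl_cons, add_of_not_mem [a] b (by simp [Ne.symm hab])]
  exact foldl_add_subset t [a, b] (fun x hx => by rcases ht x hx with rfl | rfl <;> simp)

theorem two_mem (s : List Char) (a b : Char) (h2 : (PySem.Set.ofList s).length = 2)
    (ha : a ∈ s) (hb : b ∈ s) (hab : a ≠ b) : ∀ x ∈ s, x = a ∨ x = b := by
  obtain ⟨u, v, huv⟩ := List.length_eq_two.mp h2
  have ha' : a ∈ PySem.Set.ofList s := (PySem.Set.mem_ofList s a).mpr ha
  have hb' : b ∈ PySem.Set.ofList s := (PySem.Set.mem_ofList s b).mpr hb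
  intro x hx
  have hx' : x ∈ PySem.Set.ofList s := (PySem.Set.mem_ofList s x).mpr hx
  rw [huv] at ha' hb' hx'
  simp only [List.mem_cons, List.not_mem_nil, or_false] at ha' hb' hx'
  rcases ha' with rfl | rfl <;> rcases hb' with rfl | rfl <;> rcases hx' with rfl | rfl <;> tauto

theorem min?_one (s : List Char) :
    (PySem.List.min? ((PySem.Set.ofList s).map (fun c => (s.count c : Int))) (fun x => x) = some 1)
      ↔ ∃ c ∈ s, s.count c = 1 := by
  constructor
  · intro h
    have hm := PySem.List.min?_mem h
    simp only [List.mem_map] at hm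
    obtain ⟨c, hc, hcc⟩ := hm
    exact ⟨c, (PySem.Set.mem_ofList s c).mp hc, by exact_mod_cast hcc⟩
  · rintro ⟨c, hc, hcount⟩
    have hc' : c ∈ PySem.Set.ofList s := (PySem.Set.mem_ofList s c).mpr hc
    have h1m : (1 : Int) ∈ (PySem.Set.ofList s).map (fun c => (s.count c : Int)) :=
      List.mem_map.mpr ⟨c, hc', by simp [hcount]⟩
    cases hmin : PySem.List.min? ((PySem.Set.ofList s).map (fun c => (s.count c : Int))) (fun x => x) with
    | none =>
      rw [PySem.List.min?_eq_none_iff] at hmin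
      rw [hmin] at h1m
      simp at h1m
    | some v =>
      have hle : v ≤ 1 := PySem.List.min?_isMin hmin 1 h1m
      have hv := PySem.List.min?_mem hmin
      simp only [List.mem_map] at hv
      obtain ⟨c', hc'', hvc⟩ := hv
      have hmem : c' ∈ s := (PySem.Set.mem_ofList s c').mp hc''
      have hpos : 0 < s.count c' := List.count_pos_iff.mpr hmem
      have hv1 : v = 1 := by omega
      rw [hv1]

theorem count_a (m : Nat) (a b : Char) (t : List Char) (hab : a ≠ b) :
    (List.replicate (m + 1) a ++ b :: t).count a = (m + 1) + t.count a := by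
  simp [List.count_append, Ne.symm hab]

theorem count_b (m : Nat) (a b : Char) (t : List Char) (hab : a ≠ b) :
    (List.replicate (m + 1) a ++ b :: t).count b = t.count b + 1 := by
  simp [List.count_append, List.count_replicate, hab]

theorem keyStep (a b : Char) (m : Nat) (t : List Char) (hab : a ≠ b) :
    (decide ((PySem.Set.ofList (List.replicate (m + 1) a ++ b :: t)).length = 2) &&
      decide (PySem.List.min? ((PySem.Set.ofList (List.replicate (m + 1) a ++ b :: t)).map
        (fun c => ((List.replicate (m + 1) a ++ b :: t).count c : Int))) (fun x => x) = some 1))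
      = ((decide (m = 0) && t.all (· == b)) || t.all (· == a)) := by
  rw [Bool.eq_iff_iff]
  simp only [Bool.and_eq_true, Bool.or_eq_true, decide_eq_true_eq, List.all_eq_true,
    beq_iff_eq, min?_one]
  constructor
  · rintro ⟨hlen, c, hc, hcount⟩
    have hmem : ∀ x ∈ (List.replicate (m + 1) a ++ b :: t), x = a ∨ x = b :=
      two_mem _ a b hlen (by simp) (by simp) hab
    rcases hmem c hc with rfl | rfl
    · left
      rw [count_a m c b t hab] at hcount
      have hm0 : m = 0 := by omega
      have hta : t.count c = 0 := by omega
      refine ⟨hm0, fun x hx => ?_⟩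
      rcases hmem x (by simp [hx]) with rfl | rfl
      · exact absurd hx (List.count_eq_zero.mp hta)
      · rfl
    · right
      rw [count_b m a c t hab] at hcount
      have htb : t.count c = 0 := by omega
      intro x hx
      rcases hmem x (by simp [hx]) with rfl | rfl
      · rfl
      · exact absurd hx (List.count_eq_zero.mp htb)
  · intro h
    have hmem : ∀ x ∈ t, x = a ∨ x = b := by
      rcases h with ⟨_, htb⟩ | hta
      · exact fun x hx => Or.inr (htb x hx)
      · exact fun x hx => Or.inl (hta x hx)
    have hl : (PySem.Set.ofList (List.replicate (m + 1) a ++ b :: t)).length = 2 := by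
      rw [ofList_ab m a b t hab hmem]
      rfl
    refine ⟨hl, ?_⟩
    rcases h with ⟨hm0, htb⟩ | hta
    · refine ⟨a, by simp, ?_⟩
      rw [count_a m a b t hab, hm0]
      have : t.count a = 0 := List.count_eq_zero.mpr (fun hx => hab (htb a hx))
      omega
    · refine ⟨b, by simp, ?_⟩
      rw [count_b m a b t hab]
      have : t.count b = 0 := List.count_eq_zero.mpr (fun hx => hab ((hta b hx).symm))
      omega

theorem loopEq (rest : List Char) : ∀ (m : Nat) (a : Char),
    checkNumLoop (List.replicate (m + 1) a ++ rest)
      (PySem.List.pyRange (m : Int) (((List.replicate (m + 1) a ++ rest).length : Int) - 1) 1)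
      = scanB a m rest := by
  induction rest with
  | nil =>
    intro m a
    rw [PySem.List.pyRange_one_eq_nil (by simp)]
    simp [checkNumLoop, scanB]
  | cons b t ih =>
    intro m a
    have hlen : ((List.replicate (m + 1) a ++ b :: t).length : Int) - 1
        = (m : Int) + 1 + (t.length : Int) := by
      simp only [List.length_append, List.length_replicate, List.length_cons]
      push_cast
      ring
    rw [PySem.List.pyRange_one_cons (by rw [hlen]; omega)]
    show (if PySem.List.pyGet? _ (m : Int) ≠ PySem.List.pyGet? _ ((m : Int) + 1) then _ else _) = _
    rw [pyGet_rep_m, pyGet_rep_succ]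
    by_cases hab : a = b
    · subst hab
      rw [if_neg (by simp)]
      have hs : List.replicate (m + 1) a ++ a :: t = List.replicate (m + 2) a ++ t := by
        rw [rep_succ_cons (m + 1) a t]
      have hcast : (m : Int) + 1 = ((m + 1 : Nat) : Int) := by push_cast; ring
      rw [show scanB a m (a :: t) = scanB a (m + 1) t from by simp [scanB], hcast]
      have := ih (m + 1) a
      rw [hs]
      exact this
    · rw [if_pos (by simp [hab])]
      have hcast : (m : Int) + 1 = ((m + 1 : Nat) : Int) := by push_cast; ring
      rw [hcast, areEq_eq _ m, areEq_eq _ (m + 1), erase_at_m, erase_at_succ,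
        allB_rep_app m a t,
        show scanB a m (b :: t) = ((decide (m = 0) && t.all (· == b)) || t.all (· == a)) from by
          simp [scanB, hab]]
      cases m with
      | zero =>
        rw [show List.replicate 0 a ++ b :: t = b :: t from rfl, allB_cons]
        simp
      | succ m' =>
        rw [allB_rep_ne m' a b t hab]
        simp

theorem altEq (rest : List Char) : ∀ (m : Nat) (a : Char),
    scanB a m rest =
      (decide ((PySem.Set.ofList (List.replicate (m + 1) a ++ rest)).length = 2) &&
        decide (PySem.List.min? ((PySem.Set.ofList (List.replicate (m + 1) a ++ rest)).map
          (fun c => ((List.replicate (m + 1) a ++ rest).count c : Int))) (fun x => x) = some 1)) := by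
  induction rest with
  | nil =>
    intro m a
    have h1 : PySem.Set.ofList (List.replicate (m + 1) a ++ []) = [a] := by
      rw [List.append_nil, PySem.Set.ofList_eq_foldl, foldl_add_rep]
    rw [h1]
    simp [scanB]
  | cons b t ih =>
    intro m a
    by_cases hab : a = b
    · subst hab
      have hs : List.replicate (m + 1) a ++ a :: t = List.replicate (m + 2) a ++ t := by
        rw [rep_succ_cons (m + 1) a t]
      rw [show scanB a m (a :: t) = scanB a (m + 1) t from by simp [scanB], hs]
      exact ih (m + 1) a
    · rw [show scanB a m (b :: t) = ((decide (m = 0) && t.all (· == b)) || t.all (· == a)) from by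
        simp [scanB, hab]]
      exact (keyStep a b m t hab).symm

theorem bodyEq (s : List Char) :
    checkNumLoop s (PySem.List.pyRange 0 ((s.length : Int) - 1) 1) =
      (decide ((PySem.Set.ofList s).length = 2) &&
        decide (PySem.List.min? ((PySem.Set.ofList s).map (fun c => (s.count c : Int)))
          (fun x => x) = some 1)) := by
  cases s with
  | nil =>
    rw [PySem.List.pyRange_one_eq_nil (by norm_num)]
    rfl
  | cons a rest =>
    have h1 := loopEq rest 0 a
    have h2 := altEq rest 0 a
    rw [show List.replicate (0 + 1) a ++ rest = a :: rest from rfl] at h1 h2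
    rw [show ((0 : Nat) : Int) = (0 : Int) from rfl] at h1
    exact h1.trans h2

-- ===== VERDICT (by name: the statement is the Claim_ definition above) =====
theorem checkNum_spec : Claim_equal_checkNum := by
  intro num _
  unfold Spec_checkNum checkNum checkNum_alt
  exact bodyEq _
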